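-- pv_equiv track=rewrite | github.com/kylecrosby2/SenatorComerfordInternship | CommunityFluencyAutomation.py | split_thread
-- ===== SOURCE A (Python) =====
-- def split_thread(thread, short_day_list, short_month_list):
--     individual_emails = []
--     emails_by_line = thread.split('\n')
--     current_email = ''
--     index = 0
--     for line in emails_by_line:
--         index += 1
--         if line[:5] == 'From:' or line[3:6] in short_day_list or index == len(emails_by_line) or line[5:8] in short_month_list:
--             individual_emails.append(current_email)
--             current_email = ''
--         current_email += line + '\n'
--     return individual_emails
-- ===== SOURCE B (Python) =====
-- def split_thread(thread, short_day_list, short_month_list):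
--     lines = thread.split('\n')
--     n = len(lines)
--     bounds = [i for i, line in enumerate(lines)
--               if line[:5] == 'From:' or line[3:6] in short_day_list
--               or i == n - 1 or line[5:8] in short_month_list]
--     emails = []
--     prev = 0
--     for b in bounds:
--         emails.append(''.join(l + '\n' for l in lines[prev:b]))
--         prev = b
--     return emails
-- ===== Notes on version B (the rewrite author's own statement) =====
-- stated objective: alternative
-- what changed: B replaces A's single accumulator loop (mutable current_email string grown line by line) with a two-pass decomposition: first collect the boundary line indices, then cut the line list into slices between consecutive boundaries and join each slice.
import Mathlib
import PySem

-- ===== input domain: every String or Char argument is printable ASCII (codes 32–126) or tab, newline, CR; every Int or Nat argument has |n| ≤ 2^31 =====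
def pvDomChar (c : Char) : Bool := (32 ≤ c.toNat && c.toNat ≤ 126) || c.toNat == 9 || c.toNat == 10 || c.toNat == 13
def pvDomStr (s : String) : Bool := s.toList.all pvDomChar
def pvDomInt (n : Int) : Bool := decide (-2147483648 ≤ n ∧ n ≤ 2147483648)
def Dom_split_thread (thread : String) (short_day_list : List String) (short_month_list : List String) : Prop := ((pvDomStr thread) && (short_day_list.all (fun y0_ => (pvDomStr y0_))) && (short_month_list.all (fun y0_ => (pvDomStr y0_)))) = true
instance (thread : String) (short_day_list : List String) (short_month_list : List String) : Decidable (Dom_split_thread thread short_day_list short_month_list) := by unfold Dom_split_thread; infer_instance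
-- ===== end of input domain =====

-- B replaces A's accumulator loop with a two-pass decomposition (boundary indices, then slices); same result, proved equal.

-- ===== PORT A =====
-- loop body of A's for-loop, as a named helper (state: individual_emails, current_email, index)
def splitThreadStepA (short_day_list short_month_list : List String) (n : Nat)
    (st : List String × String × Nat) (line : String) : List String × String × Nat :=
  let idx := st.2.2 + 1
  if (PySem.Str.slice line none (some 5) == "From:"
      || short_day_list.contains (PySem.Str.slice line (some 3) (some 6))
      || idx == n
      || short_month_list.contains (PySem.Str.slice line (some 5) (some 8))) then
    (st.1 ++ [st.2.1], "" ++ (line ++ "\n"), idx)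
  else
    (st.1, st.2.1 ++ (line ++ "\n"), idx)

def split_thread (thread : String) (short_day_list : List String) (short_month_list : List String) : List String :=
  -- thread.split('\n'): the separator "\n" is a nonempty literal, so Str.split? is always `some` (getD is exact here)
  let emails_by_line := (PySem.Str.split? thread "\n").getD []
  (emails_by_line.foldl (splitThreadStepA short_day_list short_month_list emails_by_line.length) ([], "", 0)).1

-- ===== PORT B =====
-- boundary condition of B's first pass, on an enumerate pair (i, line)
def splitThreadCondB (short_day_list short_month_list : List String) (n : Nat) (p : Int × String) : Bool :=
  PySem.Str.slice p.2 none (some 5) == "From:"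
  || short_day_list.contains (PySem.Str.slice p.2 (some 3) (some 6))
  || p.1 == (n : Int) - 1
  || short_month_list.contains (PySem.Str.slice p.2 (some 5) (some 8))

-- loop body of B's second pass (state: emails, prev)
def splitThreadStepB (lines : List String) (st : List String × Int) (b : Int) : List String × Int :=
  (st.1 ++ [PySem.Str.join "" ((PySem.List.slice lines (some st.2) (some b)).map (fun l => l ++ "\n"))], b)

def split_thread_alt (thread : String) (short_day_list : List String) (short_month_list : List String) : List String :=
  let lines := (PySem.Str.split? thread "\n").getD []
  let bounds := ((PySem.List.enumerate lines).filter
      (splitThreadCondB short_day_list short_month_list lines.length)).map (·.1)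
  (bounds.foldl (splitThreadStepB lines) ([], 0)).1

-- ===== PRECONDITION & SPEC =====
def Spec_split_thread (thread : String) (short_day_list : List String) (short_month_list : List String) (out : List String) : Prop := out = split_thread_alt thread short_day_list short_month_list
instance (thread : String) (short_day_list : List String) (short_month_list : List String) (out : List String) : Decidable (Spec_split_thread thread short_day_list short_month_list out) := by unfold Spec_split_thread; infer_instance

-- ===== CLAIM (what is proved, stated in full; the proofs are below) =====
def Claim_equal_split_thread : Prop := ∀ (thread : String) (short_day_list : List String) (short_month_list : List String), Dom_split_thread thread short_day_list short_month_list → Spec_split_thread thread short_day_list short_month_list (split_thread thread short_day_list short_month_list)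

-- ===== LEMMAS AND PROOFS =====

-- the segment of lines [p, k), each line with a trailing newline, joined
def pvSeg (lines : List String) (p k : Nat) : String :=
  PySem.Str.join "" (((lines.drop p).take (k - p)).map (fun l => l ++ "\n"))

theorem pvJoin_empty_append (xs : List String) (y : String) :
    PySem.Str.join "" (xs ++ [y]) = PySem.Str.join "" xs ++ y := by
  have h : ∀ (l : List (List Char)), (List.intersperse ([]:List Char) l).flatten = l.flatten := by
    intro l; induction l with
    | nil => rfl
    | cons a l ih => cases l <;> simp_all [List.intersperse]
  simp [PySem.Str.join, PySem.Chars.join, List.intercalate, h, String.ofList_append]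

theorem pvSeg_refl (lines : List String) (k : Nat) : pvSeg lines k k = "" := by
  simp [pvSeg, PySem.Str.join, PySem.Chars.join, List.intercalate]

theorem pvSeg_snoc (lines : List String) (p k : Nat) (l : String)
    (hp : p ≤ k) (hl : lines[k]? = some l) :
    pvSeg lines p (k + 1) = pvSeg lines p k ++ (l ++ "\n") := by
  have h1 : (lines.drop p)[k - p]? = some l := by
    rw [List.getElem?_drop]; rwa [Nat.add_sub_cancel' hp]
  have h2 : (lines.drop p).take (k + 1 - p) = (lines.drop p).take (k - p) ++ [l] := by
    rw [show k + 1 - p = (k - p) + 1 by omega, List.take_add_one, h1]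
    rfl
  simp [pvSeg, h2, pvJoin_empty_append]

theorem pvKey (sdl sml lines : List String) :
    ∀ (rest : List String) (k p : Nat) (acc : List String),
      rest = lines.drop k → p ≤ k →
      (rest.foldl (splitThreadStepA sdl sml lines.length) (acc, pvSeg lines p k, k)).1
      = ((PySem.List.enumerate rest (k : Int)).foldl
          (fun st q => if splitThreadCondB sdl sml lines.length q then splitThreadStepB lines st q.1 else st)
          (acc, (p : Int))).1 := by
  intro rest
  induction rest with
  | nil => intro k p acc _ _; simp [PySem.List.enumerate]
  | cons l rest ih =>
    intro k p acc hrest hp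
    have hl : lines[k]? = some l := by
      have h0 : (lines.drop k)[0]? = some l := by rw [← hrest]; rfl
      simpa using h0
    have hdrop : lines.drop (k + 1) = rest := by
      have h1 := congrArg (List.drop 1) hrest
      simpa [List.drop_drop] using h1.symm
    have hcond : ((PySem.Str.slice l none (some 5) == "From:"
        || sdl.contains (PySem.Str.slice l (some 3) (some 6))
        || (k + 1 == lines.length)
        || sml.contains (PySem.Str.slice l (some 5) (some 8))))
        = splitThreadCondB sdl sml lines.length ((k : Int), l) := by
      have : ((k + 1 : Nat) == lines.length) = (((k : Nat) : Int) == (lines.length : Int) - 1) := by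
        by_cases h : k + 1 = lines.length
        · simp [h, show ((k : Int) = (lines.length : Int) - 1) from by omega]
        · simp [h, show ¬ ((k : Int) = (lines.length : Int) - 1) from by omega]
      simp only [splitThreadCondB, this]
    rw [PySem.List.enumerate_cons]
    simp only [List.foldl_cons, ← hcond, splitThreadStepA]
    by_cases hc : (PySem.Str.slice l none (some 5) == "From:"
        || sdl.contains (PySem.Str.slice l (some 3) (some 6))
        || (k + 1 == lines.length)
        || sml.contains (PySem.Str.slice l (some 5) (some 8))) = true
    · simp only [hc, if_pos]
      have hslice : PySem.List.slice lines (some (p : Int)) (some (k : Int))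
          = (lines.drop p).take (k - p) := PySem.List.slice_natCast lines p k
      have hcur : "" ++ (l ++ "\n") = pvSeg lines k (k + 1) := by
        rw [pvSeg_snoc lines k k l (le_refl k) hl, pvSeg_refl]
      have := ih (k + 1) k (acc ++ [pvSeg lines p k]) hdrop.symm (by omega)
      rw [hcur]
      rw [this]
      simp only [splitThreadStepB, pvSeg, hslice]
      norm_cast
    · simp only [hc, if_neg, Bool.false_eq_true, not_false_iff]
      have hcur : pvSeg lines p k ++ (l ++ "\n") = pvSeg lines p (k + 1) :=
        (pvSeg_snoc lines p k l hp hl).symm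
      have := ih (k + 1) p acc hdrop.symm (by omega)
      rw [hcur, this]
      norm_cast

-- ===== VERDICT (by name: the statement is the Claim_ definition above) =====
theorem split_thread_spec : Claim_equal_split_thread := by
  intro thread sdl sml _
  unfold Spec_split_thread split_thread split_thread_alt
  generalize (PySem.Str.split? thread "\n").getD [] = lines
  dsimp only
  rw [List.foldl_map, List.foldl_filter]
  have h0 : ("" : String) = pvSeg lines 0 0 := (pvSeg_refl lines 0).symm
  have := pvKey sdl sml lines lines 0 0 [] (by simp) (le_refl 0)
  rw [h0]
  simpa using this
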